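-- pv_equiv track=rewrite | github.com/stulli103/gagnathon2020 | implementation_files/combined.py | getMultipleSettings
-- ===== SOURCE A (Python) =====
-- def getMultipleSettings(listOfLines, setting):
--     returnList = []
--
--     lineList = []
--     startAdding = False
--
--     for line in listOfLines:
--         if startAdding == True:
--             lineList.append(line)
--
--         if setting in line:
--             if startAdding == True:
--                 returnList.append(lineList[:-1])
--                 lineList = []
--             startAdding = not startAdding
--
--     return returnList
-- ===== SOURCE B (Python) =====
-- def getMultipleSettings(listOfLines, setting):
--     # Split the lines into segments at every marker line (a line containing
--     # `setting`); the trailing segment after the last marker is never closed,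
--     # so it is not appended.  The wanted groups are exactly the segments at
--     # odd positions (between marker 1 and 2, 3 and 4, ...).
--     segs = []
--     cur = []
--     for line in listOfLines:
--         if setting in line:
--             segs.append(cur)
--             cur = []
--         else:
--             cur.append(line)
--     return segs[1::2]
-- ===== Notes on version B (the rewrite author's own statement) =====
-- stated objective: simpler
-- what changed: Instead of a start/stop toggle with conditional appends and a [:-1] truncation of the accumulated buffer, B unconditionally splits the input into segments at marker lines and returns the odd-indexed segments segs[1::2].
import Mathlib
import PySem

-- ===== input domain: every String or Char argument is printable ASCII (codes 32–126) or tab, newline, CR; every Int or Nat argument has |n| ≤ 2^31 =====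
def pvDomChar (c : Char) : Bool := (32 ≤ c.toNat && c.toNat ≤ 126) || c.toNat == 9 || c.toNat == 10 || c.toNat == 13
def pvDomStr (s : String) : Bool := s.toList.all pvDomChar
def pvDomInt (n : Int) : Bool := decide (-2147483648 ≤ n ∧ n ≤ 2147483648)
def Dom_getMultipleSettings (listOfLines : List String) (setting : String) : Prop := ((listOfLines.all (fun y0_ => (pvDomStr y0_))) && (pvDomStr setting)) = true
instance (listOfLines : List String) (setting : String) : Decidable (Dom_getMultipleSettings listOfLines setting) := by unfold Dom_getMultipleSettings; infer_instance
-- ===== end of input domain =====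

-- B replaces A's start/stop toggle + [:-1] truncation by splitting at markers and
-- taking the odd-indexed segments (objective: simpler).


-- ===== PORT A =====
-- one iteration of A's loop over (returnList, lineList, startAdding)
def stepA (setting : String) (st : List (List String) × List String × Bool) (line : String) :
    List (List String) × List String × Bool :=
  let returnList := st.1
  let lineList := if st.2.2 then st.2.1 ++ [line] else st.2.1
  if PySem.Str.isIn setting line then
    if st.2.2 then (returnList ++ [PySem.List.slice lineList none (some (-1))], ([] : List String), false)
    else (returnList, lineList, true)
  else (returnList, lineList, st.2.2)

def getMultipleSettings (listOfLines : List String) (setting : String) : List (List String) :=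
  (listOfLines.foldl (stepA setting) (([] : List (List String)), ([] : List String), false)).1

-- ===== PORT B =====
-- one iteration of B's loop over (segs, cur)
def stepB (setting : String) (st : List (List String) × List String) (line : String) :
    List (List String) × List String :=
  if PySem.Str.isIn setting line then (st.1 ++ [st.2], ([] : List String))
  else (st.1, st.2 ++ [line])

-- segs[1::2]: the elements at odd indices, in order (hand port of the stride-2 slice; exact)
def oddIdx : List (List String) → List (List String)
  | [] => []
  | [_] => []
  | _ :: b :: t => b :: oddIdx t

def getMultipleSettings_alt (listOfLines : List String) (setting : String) : List (List String) :=
  oddIdx (listOfLines.foldl (stepB setting) (([] : List (List String)), ([] : List String))).1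

-- ===== PRECONDITION & SPEC =====
def Spec_getMultipleSettings (listOfLines : List String) (setting : String) (out : List (List String)) : Prop := out = getMultipleSettings_alt listOfLines setting
instance (listOfLines : List String) (setting : String) (out : List (List String)) : Decidable (Spec_getMultipleSettings listOfLines setting out) := by unfold Spec_getMultipleSettings; infer_instance

-- ===== CLAIM (what is proved, stated in full; the proofs are below) =====
def Claim_equal_getMultipleSettings : Prop := ∀ (listOfLines : List String) (setting : String), Dom_getMultipleSettings listOfLines setting → Spec_getMultipleSettings listOfLines setting (getMultipleSettings listOfLines setting)

-- ===== LEMMAS AND PROOFS =====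

-- recursive mirror of A's loop body
def acore (setting : String) : List String → Bool → List String → List (List String)
  | [], _, _ => []
  | x :: xs, sa, ll =>
    let ll' := if sa then ll ++ [x] else ll
    if PySem.Str.isIn setting x then
      if sa then ll'.dropLast :: acore setting xs false [] else acore setting xs true ll'
    else acore setting xs sa ll'

-- recursive mirror of B's loop body (the list of closed segments)
def bcore (setting : String) : List String → List String → List (List String)
  | [], _ => []
  | x :: xs, cur =>
    if PySem.Str.isIn setting x then cur :: bcore setting xs []
    else bcore setting xs (cur ++ [x])

-- elements at even indices
def evenIdx (xs : List (List String)) : List (List String) :=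
  match xs with
  | [] => []
  | a :: t => a :: oddIdx t

lemma oddIdx_cons (a : List String) (t : List (List String)) : oddIdx (a :: t) = evenIdx t := by
  cases t <;> simp [oddIdx, evenIdx]

lemma foldA (setting : String) (xs : List String) :
    ∀ (ret : List (List String)) (ll : List String) (sa : Bool),
      (xs.foldl (stepA setting) (ret, ll, sa)).1 = ret ++ acore setting xs sa ll := by
  induction xs with
  | nil => intro ret ll sa; simp [acore]
  | cons x xs ih =>
    intro ret ll sa
    simp only [List.foldl_cons, stepA, acore]
    by_cases h : PySem.Chars.isIn setting.toList x.toList = true <;> cases sa <;>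
      simp [h, ih, PySem.List.slice_to_neg_one]

lemma foldB (setting : String) (xs : List String) :
    ∀ (segs : List (List String)) (cur : List String),
      (xs.foldl (stepB setting) (segs, cur)).1 = segs ++ bcore setting xs cur := by
  induction xs with
  | nil => intro segs cur; simp [bcore]
  | cons x xs ih =>
    intro segs cur
    simp only [List.foldl_cons, stepB, bcore]
    by_cases h : PySem.Chars.isIn setting.toList x.toList = true <;> simp [h, ih]

-- oddIdx of the segment list does not depend on the still-open first segment
lemma oddIdx_bcore_indep (setting : String) (xs : List String) :
    ∀ cur cur', oddIdx (bcore setting xs cur) = oddIdx (bcore setting xs cur') := by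
  induction xs with
  | nil => intro _ _; simp [bcore]
  | cons x xs ih =>
    intro cur cur'
    by_cases h : PySem.Chars.isIn setting.toList x.toList = true
    · simp [bcore, h, oddIdx_cons]
    · simp only [bcore, PySem.Str.isIn, h, Bool.false_eq_true, if_false]
      exact ih _ _

lemma acore_eq (setting : String) (xs : List String) :
    (∀ acc, acore setting xs true acc = evenIdx (bcore setting xs acc)) ∧
      acore setting xs false [] = oddIdx (bcore setting xs []) := by
  induction xs with
  | nil => exact ⟨fun _ => by simp [acore, bcore, evenIdx], by simp [acore, bcore, oddIdx]⟩
  | cons x xs ih =>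
    constructor
    · intro acc
      by_cases h : PySem.Chars.isIn setting.toList x.toList = true
      · simp [acore, bcore, h, evenIdx, ih.2]
      · simp [acore, bcore, h, ih.1]
    · by_cases h : PySem.Chars.isIn setting.toList x.toList = true
      · simp [acore, bcore, h, oddIdx_cons, evenIdx, ih.1]
      · have hi := oddIdx_bcore_indep setting xs [] [x]
        simp [acore, bcore, h, ih.2, hi]

-- ===== VERDICT (by name: the statement is the Claim_ definition above) =====
theorem getMultipleSettings_spec : Claim_equal_getMultipleSettings := by
  intro listOfLines setting _
  unfold Spec_getMultipleSettings getMultipleSettings getMultipleSettings_alt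
  rw [foldA, foldB]
  simpa using (acore_eq setting listOfLines).2
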